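-- pv_equiv track=rewrite | github.com/sdn0303/terrasight | scripts/tools/pipeline/adapters/zip_utils.py | _select_file
-- ===== SOURCE A (Python) =====
-- def _select_file(
--     candidates: list[str],
--     prefer_utf8: bool,
--     filename_hint: str | None,
-- ) -> str | None:
--     """Select the best file from candidates based on preferences."""
--     if not candidates:
--         return None
--
--     filtered = candidates
--
--     # Apply filename hint filter
--     if filename_hint:
--         matching = [c for c in filtered if filename_hint in c]
--         if matching:
--             filtered = matching
--
--     # Prefer UTF-8 directory
--     if prefer_utf8:
--         utf8 = [c for c in filtered if "UTF-8/" in c or "utf-8/" in c]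
--         if utf8:
--             filtered = utf8
--
--     # Avoid Shift-JIS if we have non-Shift-JIS alternatives
--     non_sjis = [c for c in filtered if "Shift-JIS/" not in c and "shift-jis/" not in c]
--     if non_sjis:
--         filtered = non_sjis
--
--     return filtered[0] if filtered else candidates[0]
-- ===== SOURCE B (Python) =====
-- def _select_file(
--     candidates: list[str],
--     prefer_utf8: bool,
--     filename_hint: str | None,
-- ) -> str | None:
--     """Select the best file from candidates based on preferences."""
--     if not candidates:
--         return None
--
--     def score(c: str) -> int:
--         hint_ok = (filename_hint in c) if filename_hint else True
--         utf8_ok = ("UTF-8/" in c or "utf-8/" in c) if prefer_utf8 else True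
--         not_sjis = not ("Shift-JIS/" in c or "shift-jis/" in c)
--         return 4 * hint_ok + 2 * utf8_ok + not_sjis
--
--     # max returns the first candidate achieving the maximal score,
--     # which matches the "first survivor" of the guarded filters.
--     return max(candidates, key=score)
-- ===== Notes on version B (the rewrite author's own statement) =====
-- stated objective: idiomatic
-- what changed: Replaces A's three guarded narrowing filter passes over intermediate lists with a single max() over a per-candidate 3-bit priority score (hint-match, utf8-if-preferred, non-Shift-JIS), relying on max's first-wins tie-break to reproduce the first survivor.
import Mathlib
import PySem

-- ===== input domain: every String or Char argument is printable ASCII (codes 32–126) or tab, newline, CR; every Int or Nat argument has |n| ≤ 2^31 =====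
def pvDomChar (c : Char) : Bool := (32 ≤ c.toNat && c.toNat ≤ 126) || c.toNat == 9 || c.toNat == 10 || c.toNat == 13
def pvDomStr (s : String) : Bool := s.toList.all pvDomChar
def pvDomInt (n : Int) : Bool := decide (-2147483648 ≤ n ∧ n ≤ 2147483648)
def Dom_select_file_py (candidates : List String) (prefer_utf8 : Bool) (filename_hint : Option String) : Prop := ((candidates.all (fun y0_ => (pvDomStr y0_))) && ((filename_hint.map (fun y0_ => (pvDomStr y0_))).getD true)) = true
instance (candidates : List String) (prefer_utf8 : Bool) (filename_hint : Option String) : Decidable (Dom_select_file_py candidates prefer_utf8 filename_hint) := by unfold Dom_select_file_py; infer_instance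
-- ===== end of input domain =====

-- B replaces A's three guarded narrowing filter passes with one max() over a 3-bit
-- priority score per candidate (idiomatic single pass; same O(n) cost).

-- ===== PORT A =====
def select_file_py (candidates : List String) (prefer_utf8 : Bool) (filename_hint : Option String) : Option String :=
  if candidates.isEmpty then none
  else
    let filtered := candidates
    -- if filename_hint: (truthy = not None and not "")
    let filtered :=
      match filename_hint with
      | none => filtered
      | some h =>
        if h = "" then filtered
        else
          let matching := filtered.filter (fun c => PySem.Str.isIn h c)
          if matching.isEmpty then filtered else matching
    let filtered :=
      if prefer_utf8 then
        let utf8 := filtered.filter (fun c => PySem.Str.isIn "UTF-8/" c || PySem.Str.isIn "utf-8/" c)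
        if utf8.isEmpty then filtered else utf8
      else filtered
    let non_sjis := filtered.filter (fun c => !PySem.Str.isIn "Shift-JIS/" c && !PySem.Str.isIn "shift-jis/" c)
    let filtered := if non_sjis.isEmpty then filtered else non_sjis
    match filtered with
    | [] => candidates.head?   -- 'candidates[0]': candidates is nonempty here
    | y :: _ => some y

-- ===== PORT B =====
-- hint_ok = (filename_hint in c) if filename_hint else True
def pvP1 (filename_hint : Option String) (c : String) : Bool :=
  match filename_hint with
  | none => true
  | some h => if h = "" then true else PySem.Str.isIn h c

-- utf8_ok = ("UTF-8/" in c or "utf-8/" in c) if prefer_utf8 else True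
def pvP2 (prefer_utf8 : Bool) (c : String) : Bool :=
  if prefer_utf8 then PySem.Str.isIn "UTF-8/" c || PySem.Str.isIn "utf-8/" c else true

-- not_sjis = not ("Shift-JIS/" in c or "shift-jis/" in c)
def pvP3 (c : String) : Bool :=
  !(PySem.Str.isIn "Shift-JIS/" c || PySem.Str.isIn "shift-jis/" c)

-- 4 * hint_ok + 2 * utf8_ok + not_sjis
def pvScore (filename_hint : Option String) (prefer_utf8 : Bool) (c : String) : Nat :=
  (if pvP1 filename_hint c then 4 else 0) +
  ((if pvP2 prefer_utf8 c then 2 else 0) + (if pvP3 c then 1 else 0))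

def select_file_py_alt (candidates : List String) (prefer_utf8 : Bool) (filename_hint : Option String) : Option String :=
  if candidates.isEmpty then none
  else PySem.List.max? candidates (pvScore filename_hint prefer_utf8)

-- ===== PRECONDITION & SPEC =====
def Spec_select_file_py (candidates : List String) (prefer_utf8 : Bool) (filename_hint : Option String) (out : Option String) : Prop := out = select_file_py_alt candidates prefer_utf8 filename_hint
instance (candidates : List String) (prefer_utf8 : Bool) (filename_hint : Option String) (out : Option String) : Decidable (Spec_select_file_py candidates prefer_utf8 filename_hint out) := by unfold Spec_select_file_py; infer_instance

-- ===== CLAIM (what is proved, stated in full; the proofs are below) =====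
def Claim_equal_select_file_py : Prop := ∀ (candidates : List String) (prefer_utf8 : Bool) (filename_hint : Option String), Dom_select_file_py candidates prefer_utf8 filename_hint → Spec_select_file_py candidates prefer_utf8 filename_hint (select_file_py candidates prefer_utf8 filename_hint)

-- ===== LEMMAS AND PROOFS =====

-- A's guarded narrowing step: keep the filtered list if nonempty, else keep the input.
def pvStep {α : Type} (p : α → Bool) (l : List α) : List α :=
  if (l.filter p).isEmpty then l else l.filter p

-- the running-max loop of Python's max(key=…) once the accumulator is seeded
def pvFold1 {α : Type} (k : α → Nat) (acc : α) (l : List α) : α :=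
  l.foldl (fun b c => if k b < k c then c else b) acc

-- first maximal element by key (none on [])
def pvBestR {α : Type} (k : α → Nat) (l : List α) : Option α :=
  match l with
  | [] => none
  | y :: ys => some (pvFold1 k y ys)

lemma pvMax?_eq_bestR {α : Type} (l : List α) (k : α → Nat) :
    PySem.List.max? l k = pvBestR k l := by
  cases l with
  | nil => rfl
  | cons x xs =>
    show List.foldl _ (some x) xs = some (pvFold1 k x xs)
    induction xs generalizing x with
    | nil => rfl
    | cons c t ih =>
      show List.foldl _ (if k x < k c then some c else some x) t = _
      rw [show (if k x < k c then some c else some x) = some (if k x < k c then c else x) from by split <;> rfl]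
      exact ih _

lemma pvFold1_pos {α : Type} (p : α → Bool) (k r : α → Nat) (H : Nat)
    (hk : ∀ c, k c = (if p c then H else 0) + r c) (hr : ∀ c, r c < H) :
    ∀ (l : List α) (acc : α), p acc = true →
      pvFold1 k acc l = pvFold1 r acc (l.filter p) := by
  intro l
  induction l with
  | nil => intro acc _; rfl
  | cons c l ih =>
    intro acc hacc
    have h1 := hk acc; have h2 := hk c
    rw [hacc] at h1; simp only [if_true] at h1
    by_cases hc : p c = true
    · rw [hc] at h2; simp only [if_true] at h2
      have hiff : (k acc < k c) ↔ (r acc < r c) := by omega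
      rw [List.filter_cons_of_pos hc]
      show pvFold1 k (if k acc < k c then c else acc) l
         = pvFold1 r (if r acc < r c then c else acc) (l.filter p)
      by_cases hlt : r acc < r c
      · rw [if_pos (hiff.mpr hlt), if_pos hlt]; exact ih c hc
      · rw [if_neg (fun h => hlt (hiff.mp h)), if_neg hlt]; exact ih acc hacc
    · rw [Bool.not_eq_true] at hc
      rw [hc] at h2; simp only [Bool.false_eq_true, if_false] at h2
      have hnlt : ¬ (k acc < k c) := by have := hr c; omega
      rw [List.filter_cons_of_neg (by simp [hc])]
      show pvFold1 k (if k acc < k c then c else acc) l = _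
      rw [if_neg hnlt]
      exact ih acc hacc

lemma pvFold1_none {α : Type} (p : α → Bool) (k r : α → Nat) (H : Nat)
    (hk : ∀ c, k c = (if p c then H else 0) + r c) :
    ∀ (l : List α) (acc : α), p acc = false → l.filter p = [] →
      pvFold1 k acc l = pvFold1 r acc l := by
  intro l
  induction l with
  | nil => intro acc _ _; rfl
  | cons c l ih =>
    intro acc hacc hfil
    have hc : p c = false := by
      by_contra h
      rw [List.filter_cons_of_pos (by simpa using h)] at hfil
      exact List.cons_ne_nil _ _ hfil
    rw [List.filter_cons_of_neg (by simp [hc])] at hfil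
    have h1 := hk acc; have h2 := hk c
    rw [hacc] at h1; rw [hc] at h2
    simp only [Bool.false_eq_true, if_false] at h1 h2
    have hiff : (k acc < k c) ↔ (r acc < r c) := by omega
    show pvFold1 k (if k acc < k c then c else acc) l
       = pvFold1 r (if r acc < r c then c else acc) l
    by_cases hlt : r acc < r c
    · rw [if_pos (hiff.mpr hlt), if_pos hlt]; exact ih c hc hfil
    · rw [if_neg (fun h => hlt (hiff.mp h)), if_neg hlt]; exact ih acc hacc hfil

lemma pvFold1_switch {α : Type} (p : α → Bool) (k r : α → Nat) (H : Nat)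
    (hk : ∀ c, k c = (if p c then H else 0) + r c) (hr : ∀ c, r c < H) :
    ∀ (l : List α) (acc : α), p acc = false → l.filter p ≠ [] →
      some (pvFold1 k acc l) = pvBestR r (l.filter p) := by
  intro l
  induction l with
  | nil => intro acc _ h; exact absurd rfl h
  | cons c l ih =>
    intro acc hacc hfil
    have h1 := hk acc; have h2 := hk c
    rw [hacc] at h1; simp only [Bool.false_eq_true, if_false] at h1
    by_cases hc : p c = true
    · rw [hc] at h2; simp only [if_true] at h2
      have hlt : k acc < k c := by have := hr acc; omega
      rw [List.filter_cons_of_pos hc]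
      show some (pvFold1 k (if k acc < k c then c else acc) l) = some (pvFold1 r c (l.filter p))
      rw [if_pos hlt]
      exact congrArg some (pvFold1_pos p k r H hk hr l c hc)
    · rw [Bool.not_eq_true] at hc
      rw [hc] at h2; simp only [Bool.false_eq_true, if_false] at h2
      have hiff : (k acc < k c) ↔ (r acc < r c) := by omega
      have hfil' : l.filter p ≠ [] := by
        rwa [List.filter_cons_of_neg (by simp [hc])] at hfil
      rw [List.filter_cons_of_neg (by simp [hc])]
      show some (pvFold1 k (if k acc < k c then c else acc) l) = pvBestR r (l.filter p)
      by_cases hlt : r acc < r c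
      · rw [if_pos (hiff.mpr hlt)]; exact ih c hc hfil'
      · rw [if_neg (fun h => hlt (hiff.mp h))]; exact ih acc hacc hfil'

-- main decomposition: first-max by (p-bit * H + r) = first-max by r on A's guarded filter
lemma pvBestR_step {α : Type} (p : α → Bool) (k r : α → Nat) (H : Nat)
    (hk : ∀ c, k c = (if p c then H else 0) + r c) (hr : ∀ c, r c < H)
    (l : List α) (hl : l ≠ []) :
    pvBestR k l = pvBestR r (pvStep p l) := by
  cases l with
  | nil => exact absurd rfl hl
  | cons x xs =>
    by_cases hx : p x = true
    · have hfil : (x :: xs).filter p = x :: xs.filter p := List.filter_cons_of_pos hx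
      unfold pvStep
      rw [hfil]
      simp only [List.isEmpty_cons, Bool.false_eq_true, if_false]
      show some (pvFold1 k x xs) = some (pvFold1 r x (xs.filter p))
      exact congrArg some (pvFold1_pos p k r H hk hr xs x hx)
    · rw [Bool.not_eq_true] at hx
      have hfil : (x :: xs).filter p = xs.filter p := List.filter_cons_of_neg (by simp [hx])
      by_cases hempty : xs.filter p = []
      · unfold pvStep
        rw [hfil, hempty]
        simp only [List.isEmpty_nil, if_true]
        show some (pvFold1 k x xs) = some (pvFold1 r x xs)
        exact congrArg some (pvFold1_none p k r H hk xs x hx hempty)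
      · unfold pvStep
        rw [hfil]
        rw [if_neg (by simpa [List.isEmpty_iff] using hempty)]
        exact pvFold1_switch p k r H hk hr xs x hx hempty

lemma pvFold1_const {α : Type} (l : List α) (acc : α) :
    pvFold1 (fun _ => 0) acc l = acc := by
  induction l generalizing acc with
  | nil => rfl
  | cons c l ih => show pvFold1 _ (if (0:Nat) < 0 then c else acc) l = acc; simpa using ih acc

lemma pvBestR_const {α : Type} (l : List α) : pvBestR (fun _ => 0) l = l.head? := by
  cases l with
  | nil => rfl
  | cons x xs => show some (pvFold1 _ x xs) = some x; rw [pvFold1_const]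

lemma pvStep_ne_nil {α : Type} (p : α → Bool) (l : List α) (hl : l ≠ []) :
    pvStep p l ≠ [] := by
  unfold pvStep
  split
  · exact hl
  · next h => simpa [List.isEmpty_iff] using h

lemma pvStep_of_true {α : Type} (p : α → Bool) (l : List α) (h : ∀ c ∈ l, p c = true) :
    pvStep p l = l := by
  unfold pvStep
  rw [List.filter_eq_self.mpr h]
  split <;> rfl

-- A computes head of the three guarded narrowing steps
lemma pvA_eq_steps (candidates : List String) (prefer_utf8 : Bool) (filename_hint : Option String)
    (hne : candidates ≠ []) :
    select_file_py candidates prefer_utf8 filename_hint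
      = (pvStep pvP3 (pvStep (pvP2 prefer_utf8) (pvStep (pvP1 filename_hint) candidates))).head? := by
  unfold select_file_py
  dsimp only
  rw [if_neg (by simpa [List.isEmpty_iff] using hne)]
  have h1 : (match filename_hint with
      | none => candidates
      | some h =>
        if h = "" then candidates
        else
          let matching := candidates.filter (fun c => PySem.Str.isIn h c)
          if matching.isEmpty then candidates else matching)
      = pvStep (pvP1 filename_hint) candidates := by
    cases filename_hint with
    | none => exact (pvStep_of_true _ _ (fun c _ => rfl)).symm
    | some h =>
      dsimp only
      by_cases hh : h = ""
      · rw [if_pos hh]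
        exact (pvStep_of_true _ _ (fun c _ => by simp [pvP1, hh])).symm
      · rw [if_neg hh]
        show (if (candidates.filter _).isEmpty then candidates else candidates.filter _) = _
        unfold pvStep
        rw [show (fun c => PySem.Str.isIn h c) = pvP1 (some h) from funext fun c => by simp [pvP1, hh]]
  rw [h1]
  set l1 := pvStep (pvP1 filename_hint) candidates with hl1
  have h2 : (if prefer_utf8 then
        let utf8 := l1.filter (fun c => PySem.Str.isIn "UTF-8/" c || PySem.Str.isIn "utf-8/" c)
        if utf8.isEmpty then l1 else utf8
      else l1) = pvStep (pvP2 prefer_utf8) l1 := by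
    cases prefer_utf8 with
    | false => exact (pvStep_of_true _ _ (fun c _ => rfl)).symm
    | true =>
      show (if (l1.filter _).isEmpty then l1 else l1.filter _) = _
      unfold pvStep
      rw [show (fun c => PySem.Str.isIn "UTF-8/" c || PySem.Str.isIn "utf-8/" c) = pvP2 true from funext fun c => by simp [pvP2]]
  rw [h2]
  set l2 := pvStep (pvP2 prefer_utf8) l1 with hl2
  have h3 : (if (l2.filter (fun c => !PySem.Str.isIn "Shift-JIS/" c && !PySem.Str.isIn "shift-jis/" c)).isEmpty
        then l2
        else l2.filter (fun c => !PySem.Str.isIn "Shift-JIS/" c && !PySem.Str.isIn "shift-jis/" c))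
      = pvStep pvP3 l2 := by
    unfold pvStep
    rw [show (fun c => !PySem.Str.isIn "Shift-JIS/" c && !PySem.Str.isIn "shift-jis/" c) = pvP3 from funext fun c => by simp [pvP3, Bool.not_or]]
  rw [h3]
  have hne3 : pvStep pvP3 l2 ≠ [] :=
    pvStep_ne_nil _ _ (pvStep_ne_nil _ _ (pvStep_ne_nil _ _ hne))
  cases hstep : pvStep pvP3 l2 with
  | nil => exact absurd hstep hne3
  | cons y ys => rfl

-- B computes the same head via the score decomposition
lemma pvB_eq_steps (candidates : List String) (prefer_utf8 : Bool) (filename_hint : Option String)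
    (hne : candidates ≠ []) :
    select_file_py_alt candidates prefer_utf8 filename_hint
      = (pvStep pvP3 (pvStep (pvP2 prefer_utf8) (pvStep (pvP1 filename_hint) candidates))).head? := by
  unfold select_file_py_alt
  rw [if_neg (by simpa [List.isEmpty_iff] using hne)]
  rw [pvMax?_eq_bestR]
  rw [pvBestR_step (pvP1 filename_hint) (pvScore filename_hint prefer_utf8)
        (fun c => (if pvP2 prefer_utf8 c then 2 else 0) + (if pvP3 c then 1 else 0)) 4
        (fun c => rfl) (fun c => by dsimp only; split <;> split <;> omega)
        candidates hne]
  rw [pvBestR_step (pvP2 prefer_utf8)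
        (fun c => (if pvP2 prefer_utf8 c then 2 else 0) + (if pvP3 c then 1 else 0))
        (fun c => if pvP3 c then 1 else 0) 2
        (fun c => rfl) (fun c => by dsimp only; split <;> omega)
        _ (pvStep_ne_nil _ _ hne)]
  rw [pvBestR_step pvP3 (fun c => if pvP3 c then 1 else 0) (fun _ => 0) 1
        (fun c => by dsimp only; split <;> rfl) (fun c => by simp)
        _ (pvStep_ne_nil _ _ (pvStep_ne_nil _ _ hne))]
  exact pvBestR_const _

-- ===== VERDICT (by name: the statement is the Claim_ definition above) =====
theorem select_file_py_spec : Claim_equal_select_file_py := by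
  intro candidates prefer_utf8 filename_hint _
  unfold Spec_select_file_py
  by_cases hne : candidates = []
  · subst hne; rfl
  · rw [pvA_eq_steps candidates prefer_utf8 filename_hint hne,
        pvB_eq_steps candidates prefer_utf8 filename_hint hne]
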